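-- pv_equiv track=rewrite | github.com/Priyanshu999/Deep-Learning-Assignment-2 | PartA/train.py | _configure_filters
-- ===== SOURCE A (Python) =====
-- def _configure_filters(base_count, growth_policy, kernel_sizes):
--     """Strategic filter allocation based on network growth policy"""
--     filter_sequence = [base_count]
--
--     # Growth policy implementation
--     for idx in range(len(kernel_sizes) - 1):
--         if growth_policy == "double":
--             # Exponential capacity increase
--             filter_sequence.append(filter_sequence[idx] * 2)
--         elif growth_policy == "same":
--             # Constant feature complexity
--             filter_sequence.append(filter_sequence[idx])
--         elif growth_policy == "half":
--             # Progressive feature refinement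
--             next_filters = max(filter_sequence[idx] // 2, 1)
--             filter_sequence.append(next_filters)
--
--     # Capacity validation check (always passes)
--     if len(filter_sequence) != len(kernel_sizes):
--         raise ValueError("Filter-kernel size mismatch")
--
--     return filter_sequence
-- ===== SOURCE B (Python) =====
-- def _configure_filters(base_count, growth_policy, kernel_sizes):
--     """Strategic filter allocation based on network growth policy.
--
--     Closed-form per index instead of a previous-element recurrence."""
--     n = len(kernel_sizes)
--     if growth_policy == "double":
--         seq = [base_count] + [base_count * 2 ** i for i in range(1, n)]
--     elif growth_policy == "same":
--         seq = [base_count] + [base_count for _ in range(1, n)]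
--     elif growth_policy == "half":
--         seq = [base_count] + [max(base_count // 2 ** i, 1) for i in range(1, n)]
--     else:
--         seq = [base_count]
--
--     if len(seq) != n:
--         raise ValueError("Filter-kernel size mismatch")
--
--     return seq
-- ===== Notes on version B (the rewrite author's own statement) =====
-- stated objective: simpler
-- what changed: Replaces the previous-element recurrence (appending a function of filter_sequence[idx]) with a direct closed-form expression per index (base*2**i, base, or max(base//2**i,1)), so each element is computed independently of the list built so far.
import Mathlib
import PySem

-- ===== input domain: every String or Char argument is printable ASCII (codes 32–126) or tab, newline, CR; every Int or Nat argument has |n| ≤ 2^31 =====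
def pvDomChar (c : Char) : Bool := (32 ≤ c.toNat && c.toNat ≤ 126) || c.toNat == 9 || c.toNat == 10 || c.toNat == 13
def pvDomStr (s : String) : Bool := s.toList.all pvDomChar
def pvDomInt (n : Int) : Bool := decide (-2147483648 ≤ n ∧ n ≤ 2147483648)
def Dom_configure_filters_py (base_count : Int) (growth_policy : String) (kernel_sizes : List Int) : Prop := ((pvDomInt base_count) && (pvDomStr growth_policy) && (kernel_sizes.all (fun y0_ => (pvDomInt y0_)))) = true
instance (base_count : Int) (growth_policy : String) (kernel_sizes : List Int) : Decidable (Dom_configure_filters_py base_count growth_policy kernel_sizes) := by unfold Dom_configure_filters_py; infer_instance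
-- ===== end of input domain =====

-- B replaces A's previous-element recurrence with a closed-form expression per index; objective: simpler.


-- ===== PORT A =====
-- literal port of A's loop: range(len(kernel_sizes)-1), appending a function of filter_sequence[idx].
-- Python's filter_sequence[idx] is always in range here, so pyGetD's default 0 is never used.
-- The final `if len != len: raise ValueError` is excluded by Pre_; the port returns the sequence.
def configure_filters_py (base_count : Int) (growth_policy : String) (kernel_sizes : List Int) : List Int :=
  (PySem.List.pyRange 0 ((kernel_sizes.length : Int) - 1) 1).foldl
    (fun s idx =>
      if growth_policy = "double" then s ++ [PySem.List.pyGetD s idx 0 * 2]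
      else if growth_policy = "same" then s ++ [PySem.List.pyGetD s idx 0]
      else if growth_policy = "half" then s ++ [max (PySem.Int.floordiv (PySem.List.pyGetD s idx 0) 2) 1]
      else s)
    [base_count]

-- ===== PORT B =====
-- literal port of Source B: a seed plus a comprehension over range(1, n) with a closed form per index.
-- `2 ** i` is ported as `2 ^ i.toNat`, exact since every i in range(1, n) is nonnegative.
def configure_filters_py_alt (base_count : Int) (growth_policy : String) (kernel_sizes : List Int) : List Int :=
  let n : Int := kernel_sizes.length
  if growth_policy = "double" then
    base_count :: (PySem.List.pyRange 1 n 1).map (fun i => base_count * 2 ^ i.toNat)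
  else if growth_policy = "same" then
    base_count :: (PySem.List.pyRange 1 n 1).map (fun _ => base_count)
  else if growth_policy = "half" then
    base_count :: (PySem.List.pyRange 1 n 1).map (fun i => max (PySem.Int.floordiv base_count (2 ^ i.toNat)) 1)
  else [base_count]

-- ===== PRECONDITION & SPEC =====
-- A raises ValueError exactly when the built sequence's length misses len(kernel_sizes):
-- i.e. when kernel_sizes is empty, or when the growth policy is unknown and len(kernel_sizes) ≠ 1.
def Pre_configure_filters_py (base_count : Int) (growth_policy : String) (kernel_sizes : List Int) : Prop :=
  kernel_sizes.length = 1 ∨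
    (1 ≤ kernel_sizes.length ∧
      (growth_policy = "double" ∨ growth_policy = "same" ∨ growth_policy = "half"))
instance (base_count : Int) (growth_policy : String) (kernel_sizes : List Int) : Decidable (Pre_configure_filters_py base_count growth_policy kernel_sizes) := by unfold Pre_configure_filters_py; infer_instance

def pvWitness_configure_filters_py : Int × String × List Int := (8, "double", [3, 3, 3])

def Spec_configure_filters_py (base_count : Int) (growth_policy : String) (kernel_sizes : List Int) (out : List Int) : Prop := out = configure_filters_py_alt base_count growth_policy kernel_sizes
instance (base_count : Int) (growth_policy : String) (kernel_sizes : List Int) (out : List Int) : Decidable (Spec_configure_filters_py base_count growth_policy kernel_sizes out) := by unfold Spec_configure_filters_py; infer_instance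

-- ===== CLAIM (what is proved, stated in full; the proofs are below) =====
def Claim_equal_configure_filters_py : Prop := ∀ (base_count : Int) (growth_policy : String) (kernel_sizes : List Int), Dom_configure_filters_py base_count growth_policy kernel_sizes → Pre_configure_filters_py base_count growth_policy kernel_sizes → Spec_configure_filters_py base_count growth_policy kernel_sizes (configure_filters_py base_count growth_policy kernel_sizes)

-- ===== LEMMAS AND PROOFS =====

-- A's fold, specialised to one step function g, produces the closed-form list of any f
-- satisfying f 0 = seed and g ∘ f = f ∘ succ.
theorem pv_fold_closed (b : Int) (g : Int → Int) (f : Nat → Int)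
    (h0 : f 0 = b) (hstep : ∀ m : Nat, g (f m) = f (m + 1)) (m : Nat) :
    (PySem.List.pyRange 0 (m : Int) 1).foldl
      (fun s idx => s ++ [g (PySem.List.pyGetD s idx 0)]) [b]
      = (List.range (m + 1)).map f := by
  induction m with
  | zero => simp [PySem.List.pyRange_one_eq_nil le_rfl, h0]
  | succ m ih =>
    have hc : ((m + 1 : Nat) : Int) = (m : Int) + 1 := by push_cast; ring
    rw [hc, PySem.List.pyRange_one_succ_right (by positivity), List.foldl_append, ih]
    simp only [List.foldl]
    rw [PySem.List.pyGetD_of_nonneg _ _ (Int.natCast_nonneg m), Int.toNat_natCast,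
      PySem.List.getD_map_range f (m + 1) m 0 (Nat.lt_succ_self m), hstep,
      List.range_succ (n := m + 1), List.map_append]
    rfl

-- B's seed-plus-comprehension over range(1, m+1) is the closed-form list of f.
theorem pv_cons_map_closed (b : Int) (f : Nat → Int) (f' : Int → Int)
    (h0 : f 0 = b) (hf : ∀ k : Nat, f' (1 + (k : Int)) = f (k + 1)) (m : Nat) :
    b :: (PySem.List.pyRange 1 ((m : Int) + 1) 1).map f' = (List.range (m + 1)).map f := by
  rw [PySem.List.pyRange_one, List.map_map, List.range_succ_eq_map]
  have h1 : ((m : Int) + 1 - 1).toNat = m := by omega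
  rw [h1]
  simp only [List.map_cons, h0, List.map_map]
  congr 1
  apply List.map_congr_left
  intro k _
  simpa using hf k

-- the 'half' step: halving a clamped floor-quotient advances the exponent.
theorem pv_half_step (b : Int) (m : Nat) :
    max (PySem.Int.floordiv (max (PySem.Int.floordiv b (2 ^ m)) 1) 2) 1
      = max (PySem.Int.floordiv b (2 ^ (m + 1))) 1 := by
  have h2m : (0 : Int) < 2 ^ m := by positivity
  rw [PySem.Int.floordiv_eq_ediv_of_pos h2m,
    PySem.Int.floordiv_eq_ediv_of_pos (by norm_num : (0 : Int) < 2),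
    PySem.Int.floordiv_eq_ediv_of_pos (by positivity : (0 : Int) < 2 ^ (m + 1)),
    pow_succ, ← Int.ediv_ediv_of_nonneg (le_of_lt h2m)]
  rcases le_total (b / 2 ^ m) 1 with hx | hx
  · rw [max_eq_right hx]
    have hx2 : b / 2 ^ m / 2 ≤ 1 := by
      have := Int.ediv_le_ediv (by norm_num : (0 : Int) < 2) hx
      omega
    rw [max_eq_right hx2]
    decide
  · rw [max_eq_left hx]

theorem configure_filters_py_spec_aux (b : Int) (gp : String) (ks : List Int)
    (hpre : Pre_configure_filters_py b gp ks) :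
    configure_filters_py b gp ks = configure_filters_py_alt b gp ks := by
  by_cases hd : gp = "double"
  · -- closed form f i = b * 2 ^ i
    obtain ⟨m, hm⟩ : ∃ m, ks.length = m + 1 := by
      rcases hpre with h | ⟨h, _⟩
      · exact ⟨0, h⟩
      · exact ⟨ks.length - 1, by omega⟩
    subst hd
    simp only [configure_filters_py, configure_filters_py_alt, hm, if_true]
    have hc : ((m + 1 : Nat) : Int) - 1 = (m : Int) := by push_cast; ring
    have hc2 : ((m + 1 : Nat) : Int) = (m : Int) + 1 := by push_cast; ring
    rw [hc, hc2,
      pv_fold_closed b (fun x => x * 2) (fun i => b * 2 ^ i) (by ring)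
        (fun k => by ring) m,
      pv_cons_map_closed b (fun i => b * 2 ^ i) (fun i => b * 2 ^ i.toNat) (by ring)
        (fun k => by
          have h1 : ((1 : Int) + (k : Int)).toNat = k + 1 := by omega
          simp [h1]) m]
  · by_cases hs : gp = "same"
    · obtain ⟨m, hm⟩ : ∃ m, ks.length = m + 1 := by
        rcases hpre with h | ⟨h, _⟩
        · exact ⟨0, h⟩
        · exact ⟨ks.length - 1, by omega⟩
      subst hs
      simp only [configure_filters_py, configure_filters_py_alt, hm, if_true]
      have hne : ("same" : String) ≠ "double" := by decide
      simp only [if_neg hne, if_true]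
      have hc : ((m + 1 : Nat) : Int) - 1 = (m : Int) := by push_cast; ring
      have hc2 : ((m + 1 : Nat) : Int) = (m : Int) + 1 := by push_cast; ring
      rw [hc, hc2,
        pv_fold_closed b (fun x => x) (fun _ => b) rfl (fun k => rfl) m,
        pv_cons_map_closed b (fun _ => b) (fun _ => b) rfl (fun k => rfl) m]
    · by_cases hh : gp = "half"
      · obtain ⟨m, hm⟩ : ∃ m, ks.length = m + 1 := by
          rcases hpre with h | ⟨h, _⟩
          · exact ⟨0, h⟩
          · exact ⟨ks.length - 1, by omega⟩
        subst hh
        simp only [configure_filters_py, configure_filters_py_alt, hm, if_true]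
        have hne1 : ("half" : String) ≠ "double" := by decide
        have hne2 : ("half" : String) ≠ "same" := by decide
        simp only [if_neg hne1, if_neg hne2, if_true]
        have hc : ((m + 1 : Nat) : Int) - 1 = (m : Int) := by push_cast; ring
        have hc2 : ((m + 1 : Nat) : Int) = (m : Int) + 1 := by push_cast; ring
        rw [hc, hc2,
          pv_fold_closed b (fun x => max (PySem.Int.floordiv x 2) 1)
            (fun i => if i = 0 then b else max (PySem.Int.floordiv b (2 ^ i)) 1) rfl
            (fun k => by
              cases k with
              | zero => simp [pow_one]
              | succ k =>
                simp only [Nat.succ_ne_zero, reduceIte]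
                exact pv_half_step b (k + 1)) m,
          pv_cons_map_closed b
            (fun i => if i = 0 then b else max (PySem.Int.floordiv b (2 ^ i)) 1)
            (fun i => max (PySem.Int.floordiv b (2 ^ i.toNat)) 1) rfl
            (fun k => by
              have h1 : ((1 : Int) + (k : Int)).toNat = k + 1 := by omega
              simp [h1]) m]
      · -- unknown policy: Pre_ forces len = 1, both sides are [b]
        have hm : ks.length = 1 := by
          rcases hpre with h | ⟨_, h | h | h⟩ <;> first | exact h | exact absurd h ‹_›
        simp only [configure_filters_py, configure_filters_py_alt, hm,
          if_neg hd, if_neg hs, if_neg hh]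
        norm_num [PySem.List.pyRange_one_eq_nil]

-- ===== VERDICT (by name: the statement is the Claim_ definition above) =====
theorem configure_filters_py_spec : Claim_equal_configure_filters_py := by
  intro b gp ks _ hpre
  exact configure_filters_py_spec_aux b gp ks hpre
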